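-- pv_equiv track=rewrite | github.com/PLucasMendonca/Trabalho | Mateus/Certidão/Certidão Caixa 3.2 (pend cap invalido) .py | processar_descricao
-- ===== SOURCE A (Python) =====
-- def processar_descricao(texto):
--     texto = texto.lower()
--     palavras = texto.split(" ")
--     descricao_processada = ""
--     i = 0
--
--     while i < len(palavras):
--         if palavras[i] in ["letra", "número"]:
--             if i + 1 < len(palavras):
--                 if i + 2 < len(palavras) and palavras[i + 2] in ["letra", "número"]:
--                     descricao_processada += palavras[i] + " " + palavras[i + 1] + ", "
--                     i += 2
--                 else:
--                     descricao_processada += palavras[i] + " " + palavras[i + 1] + " "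
--                     i += 2
--             else:
--                 descricao_processada += palavras[i] + ", "
--                 i += 1
--         else:
--             descricao_processada += palavras[i] + ", "
--             i += 1
--
--     return descricao_processada.strip(", ")
-- ===== SOURCE B (Python) =====
-- def processar_descricao(texto):
--     kw = {"letra", "n\u00famero"}
--     palavras = texto.lower().split(" ")
--     # pass 1: group words into units of one or two words
--     units = []
--     idx = 0
--     n = len(palavras)
--     while idx < n:
--         w = palavras[idx]
--         if w in kw and idx + 1 < n:
--             units.append([w, palavras[idx + 1]])
--             idx += 2
--         else:
--             units.append([w])
--             idx += 1
--     # pass 2: emit each unit with its separator, join once at the end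
--     pieces = []
--     for j, u in enumerate(units):
--         pieces.append(" ".join(u))
--         if len(u) == 2:
--             nxt = j + 1 < len(units) and units[j + 1][0] in kw
--             pieces.append(", " if nxt else " ")
--         else:
--             pieces.append(", ")
--     return "".join(pieces).strip(", ")
-- ===== Notes on version B (the rewrite author's own statement) =====
-- stated objective: alternative
-- what changed: A's single interleaved while-loop that decides each separator with a two-word lookahead while concatenating into one growing string is split into two passes: first group the words into units of one or two words, then emit each unit's text plus its separator (chosen from the next unit's first word) into a list joined once at the end.
import Mathlib
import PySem

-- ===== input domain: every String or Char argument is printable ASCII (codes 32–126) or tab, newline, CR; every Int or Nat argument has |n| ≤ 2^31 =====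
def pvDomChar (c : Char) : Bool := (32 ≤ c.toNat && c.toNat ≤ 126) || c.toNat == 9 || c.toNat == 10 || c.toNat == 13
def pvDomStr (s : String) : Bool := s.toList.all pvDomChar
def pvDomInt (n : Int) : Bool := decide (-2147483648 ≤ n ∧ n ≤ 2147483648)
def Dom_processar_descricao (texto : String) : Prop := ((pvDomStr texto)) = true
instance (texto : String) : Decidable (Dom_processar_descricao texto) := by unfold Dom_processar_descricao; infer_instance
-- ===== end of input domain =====

-- B re-decomposes A's single interleaved while-loop into two passes (group words into
-- 1/2-word units, then emit unit+separator and join once); objective: alternative, same cost.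

-- shared helper: membership in ["letra", "número"]
def pvKw (w : List Char) : Bool := w == "letra".toList || w == "número".toList

-- ===== PORT A =====
-- A's while loop, consuming one or two words per step, accumulating the output string
def pvLoopA : List (List Char) → List Char → List Char
  | [], acc => acc
  | w :: rest, acc =>
    if pvKw w then
      match rest with
      | w1 :: rest' =>
        if (match rest' with | w2 :: _ => pvKw w2 | [] => false) then
          pvLoopA rest' (acc ++ w ++ ' ' :: w1 ++ ", ".toList)
        else
          pvLoopA rest' (acc ++ w ++ ' ' :: w1 ++ " ".toList)
      | [] => pvLoopA [] (acc ++ w ++ ", ".toList)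
    else pvLoopA rest (acc ++ w ++ ", ".toList)
termination_by toks acc => toks.length
decreasing_by all_goals simp only [List.length_cons] <;> omega

def processar_descricao (texto : String) : String :=
  let t := PySem.Chars.lower texto.toList
  let palavras := PySem.Chars.splitOn t " ".toList
  String.ofList (PySem.Chars.stripChars (pvLoopA palavras []) ", ".toList)

-- ===== PORT B =====
-- pass 1: group the word list into units of one or two words
def pvUnits : List (List Char) → List (List (List Char))
  | [] => []
  | w :: rest =>
    if pvKw w then
      match rest with
      | w1 :: rest' => [w, w1] :: pvUnits rest'
      | [] => [[w]]
    else [w] :: pvUnits rest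

-- pass 2: each unit's text and its separator (units are nonempty by construction,
-- so headD is exact for Python's u[0])
def pvAssembleB : List (List (List Char)) → List (List Char)
  | [] => []
  | u :: rest =>
    PySem.Chars.join [' '] u ::
    (if u.length == 2 then
       (match rest with
        | u' :: _ => if pvKw (u'.headD []) then ", ".toList else " ".toList
        | [] => " ".toList)
     else ", ".toList) :: pvAssembleB rest

def processar_descricao_alt (texto : String) : String :=
  let t := PySem.Chars.lower texto.toList
  let palavras := PySem.Chars.splitOn t " ".toList
  String.ofList (PySem.Chars.stripChars
    (PySem.Chars.join [] (pvAssembleB (pvUnits palavras))) ", ".toList)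

-- ===== PRECONDITION & SPEC =====
def Spec_processar_descricao (texto : String) (out : String) : Prop := out = processar_descricao_alt texto
instance (texto : String) (out : String) : Decidable (Spec_processar_descricao texto out) := by unfold Spec_processar_descricao; infer_instance

-- ===== CLAIM (what is proved, stated in full; the proofs are below) =====
def Claim_equal_processar_descricao : Prop := ∀ (texto : String), Dom_processar_descricao texto → Spec_processar_descricao texto (processar_descricao texto)

-- ===== LEMMAS AND PROOFS =====

theorem pv_join_nil_cons (x : List Char) (xs : List (List Char)) :
    PySem.Chars.join [] (x :: xs) = x ++ PySem.Chars.join [] xs := by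
  cases xs with
  | nil => simp [PySem.Chars.join_singleton, PySem.Chars.join_nil]
  | cons y ys => rw [PySem.Chars.join_cons_cons]; simp

theorem pvLoopA_nil (acc : List Char) : pvLoopA [] acc = acc := by
  rw [pvLoopA]

theorem pv_loop_eq (toks : List (List Char)) : ∀ acc,
    pvLoopA toks acc = acc ++ PySem.Chars.join [] (pvAssembleB (pvUnits toks)) := by
  induction toks using pvUnits.induct with
  | case1 => intro acc; simp [pvLoopA_nil, pvUnits, pvAssembleB, PySem.Chars.join_nil]
  | case2 w hkw w1 rest' ih =>
    intro acc
    have hhead : (match rest' with | w2 :: _ => pvKw w2 | [] => false)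
        = (match pvUnits rest' with
           | u' :: _ => pvKw (u'.headD [])
           | [] => false) := by
      cases rest' with
      | nil => simp [pvUnits]
      | cons w2 rest'' =>
        by_cases h2 : pvKw w2 = true
        · cases rest'' <;> simp [pvUnits, h2]
        · cases rest'' <;> simp [pvUnits, h2]
    rw [pvLoopA.eq_def]
    simp only [pvUnits, pvAssembleB, hkw, if_true]
    rw [hhead]
    cases hu : pvUnits rest' with
    | nil =>
      simp only [hu] at ih
      simp [ih, pv_join_nil_cons, PySem.Chars.join_cons_cons,
            PySem.Chars.join_singleton, PySem.Chars.join_nil]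
    | cons u' us =>
      simp only [hu] at ih
      by_cases hk : pvKw (u'.headD []) = true
      all_goals simp only [List.headD_eq_head?_getD] at hk
      · simp [hk, ih, pv_join_nil_cons, PySem.Chars.join_cons_cons,
              PySem.Chars.join_singleton, PySem.Chars.join_nil]
      · simp [hk, ih, pv_join_nil_cons, PySem.Chars.join_cons_cons,
              PySem.Chars.join_singleton, PySem.Chars.join_nil]
  | case3 w hkw =>
    intro acc
    rw [pvLoopA.eq_def]
    simp [pvUnits, pvAssembleB, hkw, pvLoopA_nil, pv_join_nil_cons,
          PySem.Chars.join_singleton, PySem.Chars.join_nil]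
  | case4 w rest hkw ih =>
    intro acc
    rw [pvLoopA.eq_def, pvUnits.eq_def]
    simp [pvAssembleB, hkw, ih, pv_join_nil_cons,
          PySem.Chars.join_singleton, PySem.Chars.join_nil]

-- ===== VERDICT (by name: the statement is the Claim_ definition above) =====
theorem processar_descricao_spec : Claim_equal_processar_descricao := by
  intro texto _
  show processar_descricao texto = processar_descricao_alt texto
  simp only [processar_descricao, processar_descricao_alt, pv_loop_eq, List.nil_append]
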